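-- pv_equiv track=rewrite | github.com/otaviowav/Atividades-Continuas | Atividades Continuas 01/numeros.py | conta_primos
-- ===== SOURCE A (Python) =====
-- def eh_primo(n):
--     """Função que verifica se um número é primo
--
--     Recebe um número natural n, com n >= 2, e retorna verdadeiro se
--     n é um número primo e falso caso contrário.
--
--     Exemplos
--     --------
--     Um número é dito primo se possuir apenas 2 divisores, isto é,
--     não possuir nenhum divisor além do 1 e do próprio n.
--     29 é primo:
--         divisores de 29: 1, 29
--     30 NÃO é primo:
--         divisores de 30: 1, 2, 3, 5, 6, 10, 15, 30
--
--     Parâmetros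
--     ----------
--     n : int
--         Número natural a ser testado.
--
--     Retorno
--     -------
--     bool
--         True se n for um número primo e False caso contrário.
--     """
--     num_divisores = 0 #Conta o numero de divisores de n
--     for i in range(1, n+1):
--         if n % i == 0:
--             num_divisores += 1
--     if num_divisores == 2:
--         return True
--     else:
--         return False
--
-- def conta_primos(s):
--     """Função que conta a quantidade de primos em uma sequẽncia
--
--     Recebe uma sequência de números naturais s e retorna
--     um dicionário com a contagem de ocorrências de cada número
--     primo da sequência. Números não primos devem ser ignorados.
--     Os números da sequência serão sempre maiores ou iguais a 2.
--
--     Exemplos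
--     --------
--     Caso s = [11, 2, 3, 4, 11, 2, 5, 2]
--         O retorno deverá ser: {2: 3, 3: 1, 5: 1, 11: 2}
--     Caso s = [1, 4, 8, 10]
--         O retorno deverá ser: {}
--     Caso s = (111, 191, 202, 306, 239, 579)
--         O retorno deverá ser: {191: 1, 239: 1}
--
--     Parâmetros
--     ----------
--     s : list | tuple
--         itens : int
--         descrição : Uma sequência arbitrária de números naturais.
--
--     Retorno
--     -------
--     dict
--         chave : int
--         valor : int
--         descrição : a chave é o número primo e o valor
--             o total de ocorrências do número primo na
--             sequência s.
--     """
--     lista = sorted(s)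
--     dicionario = dict()
--     for x in lista:
--         if eh_primo(x):
--             if x in dicionario:
--                 dicionario[x] += 1
--             else:
--                 dicionario[x] = 1
--     return dicionario
-- ===== SOURCE B (Python) =====
-- def eh_primo(n):
--     num_divisores = 0
--     for i in range(1, n+1):
--         if n % i == 0:
--             num_divisores += 1
--     if num_divisores == 2:
--         return True
--     else:
--         return False
--
-- def conta_primos(s):
--     # tabulate all occurrences first, then one pass over the sorted DISTINCT values
--     c = {}
--     for x in s:
--         c[x] = c.get(x, 0) + 1
--     return {x: c[x] for x in sorted(c) if eh_primo(x)}
-- ===== Notes on version B (the rewrite author's own statement) =====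
-- stated objective: alternative
-- what changed: B first tabulates all occurrences in one counting pass over the raw sequence, then builds the result in a second pass over the sorted DISTINCT values (filter by primality, look the count up), so eh_primo runs once per distinct value instead of once per occurrence of A's sorted list; on distinct-heavy input the cost is the same.
import Mathlib
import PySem

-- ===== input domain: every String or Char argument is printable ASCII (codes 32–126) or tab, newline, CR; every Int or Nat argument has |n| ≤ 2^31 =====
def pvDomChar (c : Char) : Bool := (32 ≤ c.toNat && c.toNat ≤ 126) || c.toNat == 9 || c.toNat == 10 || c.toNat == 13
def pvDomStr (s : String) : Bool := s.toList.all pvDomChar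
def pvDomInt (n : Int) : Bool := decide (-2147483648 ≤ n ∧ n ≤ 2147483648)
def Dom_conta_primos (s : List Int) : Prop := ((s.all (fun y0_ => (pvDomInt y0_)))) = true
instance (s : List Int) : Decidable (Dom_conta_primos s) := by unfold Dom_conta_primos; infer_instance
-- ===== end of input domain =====

-- B tabulates all occurrences in one pass and then tests primality once per sorted DISTINCT value,
-- instead of A's primality test on every occurrence of the sorted sequence (objective: alternative).

-- ===== PORT A =====
-- shared helper of both Python files, ported once (Source B's copy is identical)
def eh_primo (n : Int) : Bool :=
  let num_divisores : Int :=
    (PySem.List.pyRange 1 (n + 1) 1).foldl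
      (fun acc i => if PySem.Int.mod n i == 0 then acc + 1 else acc) 0
  if num_divisores == 2 then true else false

def conta_primos (s : List Int) : List (Int × Int) :=
  let lista := PySem.List.sorted s (fun x => x) false
  let dicionario :=
    lista.foldl
      (fun (d : PySem.Dict Int Int) x =>
        if eh_primo x then
          if d.contains x then d.insert x ((d.get? x).getD 0 + 1)
          else d.insert x 1
        else d)
      PySem.Dict.empty
  dicionario.items

-- ===== PORT B =====
def conta_primos_alt (s : List Int) : List (Int × Int) :=
  let c := s.foldl (fun (d : PySem.Dict Int Int) x => d.insert x (d.getD x 0 + 1))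
      PySem.Dict.empty
  ((PySem.List.sorted c.keys (fun x => x) false).filter (fun x => eh_primo x)).map
    (fun x => (x, c.getD x 0))

-- ===== PRECONDITION & SPEC =====
def Spec_conta_primos (s : List Int) (out : List (Int × Int)) : Prop := out = conta_primos_alt s
instance (s : List Int) (out : List (Int × Int)) : Decidable (Spec_conta_primos s out) := by unfold Spec_conta_primos; infer_instance

-- ===== CLAIM (what is proved, stated in full; the proofs are below) =====
def Claim_equal_conta_primos : Prop := ∀ (s : List Int), Dom_conta_primos s → Spec_conta_primos s (conta_primos s)

-- ===== LEMMAS AND PROOFS =====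

-- A's two insert branches are one counting insert
theorem astep_eq (d : PySem.Dict Int Int) (x : Int) :
    (if eh_primo x then
      if d.contains x then d.insert x ((d.get? x).getD 0 + 1)
      else d.insert x 1
     else d)
    = if eh_primo x then d.insert x (d.getD x 0 + 1) else d := by
  rcases h : d.contains x with _ | _
  · have hn : d.get? x = none := (PySem.Dict.get?_eq_none_iff_contains d x).mpr h
    simp [PySem.Dict.getD_eq_get?_getD, hn]
  · simp [PySem.Dict.getD_eq_get?_getD]


-- A's loop counts exactly the prime occurrences
theorem a_fold_eq_counter (t : List Int) :
    t.foldl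
      (fun (d : PySem.Dict Int Int) x =>
        if eh_primo x then
          if d.contains x then d.insert x ((d.get? x).getD 0 + 1)
          else d.insert x 1
        else d)
      PySem.Dict.empty
    = PySem.Dict.counter (t.filter (fun x => eh_primo x)) := by
  rw [← PySem.Dict.foldl_insert_getD_add_one_eq_counter]
  suffices h : ∀ (t : List Int) (d : PySem.Dict Int Int),
      t.foldl
        (fun (d : PySem.Dict Int Int) x =>
          if eh_primo x then
            if d.contains x then d.insert x ((d.get? x).getD 0 + 1)
            else d.insert x 1
          else d) d
      = (t.filter (fun x => eh_primo x)).foldl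
          (fun (d : PySem.Dict Int Int) x => d.insert x (d.getD x 0 + 1)) d from h t _
  intro t
  induction t with
  | nil => intro d; rfl
  | cons x t ih =>
      intro d
      simp only [List.foldl_cons, List.filter_cons]
      rw [astep_eq d x]
      rcases h : eh_primo x with _ | _
      · simpa [h] using ih d
      · simpa [h] using ih (d.insert x (d.getD x 0 + 1))

theorem discard_sublist (s : List Int) (x : Int) : (PySem.Set.discard s x).Sublist s := by
  simp only [PySem.Set.discard]
  exact List.filter_sublist

theorem ofList_sublist (xs : List Int) : (PySem.Set.ofList xs).Sublist xs := by
  induction xs with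
  | nil => simp [PySem.Set.ofList_nil]
  | cons x xs ih =>
      rw [PySem.Set.ofList_cons]
      exact List.Sublist.cons₂ x ((discard_sublist _ x).trans ih)

theorem pairwise_lt_of_le_nodup {l : List Int}
    (hle : l.Pairwise (fun a b => a ≤ b)) (hnd : l.Nodup) :
    l.Pairwise (fun a b => a < b) :=
  (hle.and hnd).imp (fun h => lt_of_le_of_ne h.1 h.2)

-- two strictly increasing lists with the same members are equal
theorem sorted_lists_eq {LA LB : List Int}
    (hA : LA.Pairwise (fun a b => a < b)) (hB : LB.Pairwise (fun a b => a < b))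
    (hm : ∀ a, a ∈ LA ↔ a ∈ LB) : LA = LB := by
  have hperm : LA.Perm LB :=
    (List.perm_ext_iff_of_nodup (hA.imp (fun h => ne_of_lt h))
      (hB.imp (fun h => ne_of_lt h))).mpr hm
  rw [← PySem.List.sorted_eq_of_perm_of_pairwise_lt LB LA (fun x => x) hperm hA,
    PySem.List.sorted_eq_self_of_pairwise LB (fun x => x) (hB.imp (fun h => le_of_lt h))]

-- the two key lists coincide
theorem keys_eq (s : List Int) :
    PySem.Set.ofList ((PySem.List.sorted s (fun x => x) false).filter (fun x => eh_primo x))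
    = (PySem.List.sorted (PySem.Set.ofList s) (fun x => x) false).filter (fun x => eh_primo x) := by
  have hApair : (PySem.Set.ofList ((PySem.List.sorted s (fun x => x) false).filter
      (fun x => eh_primo x))).Pairwise (fun a b => a < b) := by
    have h1 : (PySem.List.sorted s (fun x => x) false).Pairwise (fun a b => a ≤ b) :=
      PySem.List.sorted_pairwise s (fun x => x)
    have h2 : ((PySem.List.sorted s (fun x => x) false).filter
        (fun x => eh_primo x)).Pairwise (fun a b => a ≤ b) := h1.filter _
    exact pairwise_lt_of_le_nodup (h2.sublist (ofList_sublist _)) (PySem.Set.nodup_ofList _)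
  have hBpair : ((PySem.List.sorted (PySem.Set.ofList s) (fun x => x) false).filter
      (fun x => eh_primo x)).Pairwise (fun a b => a < b) :=
    (PySem.List.sorted_ofList_pairwise_lt s).filter _
  refine sorted_lists_eq hApair hBpair (fun a => ?_)
  simp only [PySem.Set.mem_ofList, List.mem_filter, PySem.List.mem_sorted]

theorem conta_primos_spec_aux (s : List Int) : conta_primos s = conta_primos_alt s := by
  simp only [conta_primos, conta_primos_alt]
  rw [a_fold_eq_counter, PySem.Dict.foldl_insert_getD_add_one_eq_counter,
    PySem.Dict.items_counter, PySem.Dict.keys_counter, keys_eq]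
  apply List.map_congr_left
  intro k hk
  have hkmem : k ∈ (PySem.List.sorted s (fun x => x) false).filter (fun x => eh_primo x) := by
    have : k ∈ PySem.Set.ofList
        ((PySem.List.sorted s (fun x => x) false).filter (fun x => eh_primo x)) := by
      rw [keys_eq]; exact hk
    exact (PySem.Set.mem_ofList _ k).mp this
  have hp : eh_primo k = true := (List.mem_filter.mp hkmem).2
  have hc1 : List.count k ((PySem.List.sorted s (fun x => x) false).filter (fun x => eh_primo x))
      = List.count k (PySem.List.sorted s (fun x => x) false) := by
    simp [List.count_filter, hp]
  have hc2 : List.count k (PySem.List.sorted s (fun x => x) false) = List.count k s :=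
    (PySem.List.sorted_perm s (fun x => x) false).count_eq k
  rw [PySem.Dict.getD_counter, hc1, hc2]

-- ===== VERDICT (by name: the statement is the Claim_ definition above) =====
theorem conta_primos_spec : Claim_equal_conta_primos := by
  intro s _
  unfold Spec_conta_primos
  exact conta_primos_spec_aux s
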